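-- pv_equiv track=rewrite | github.com/omache/Pipeline-1 | src/parse.py | is_valid_unit
-- ===== SOURCE A (Python) =====
-- def is_valid_unit(unit):
--     """Check if unit is alphanumeric (contains both letters and numbers) or purely numeric."""
--     if not unit:
--         return False
--
--     # Check if unit is purely numeric
--     if unit.isdigit():
--         return True
--
--     # Check if unit is alphanumeric (contains both letters and numbers)
--     has_letter = any(c.isalpha() for c in unit)
--     has_digit = any(c.isdigit() for c in unit)
--
--     return has_letter and has_digit
-- ===== SOURCE B (Python) =====
-- def is_valid_unit(unit):
--     """Check if unit is alphanumeric (contains both letters and numbers) or purely numeric."""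
--     cats = {"digit" if c.isdigit() else "alpha" if c.isalpha() else "other" for c in unit}
--     return cats == {"digit"} or {"digit", "alpha"} <= cats
-- ===== Notes on version B (the rewrite author's own statement) =====
-- stated objective: alternative
-- what changed: Replaces A's three boolean scans (isdigit plus two any() passes) with a classify-then-set-logic algorithm: each character is mapped to exactly one category label, the distinct labels are collected in a set, and the answer is decided by set equality with the pure-digit singleton or inclusion of the letter-and-digit pair.
import Mathlib
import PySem

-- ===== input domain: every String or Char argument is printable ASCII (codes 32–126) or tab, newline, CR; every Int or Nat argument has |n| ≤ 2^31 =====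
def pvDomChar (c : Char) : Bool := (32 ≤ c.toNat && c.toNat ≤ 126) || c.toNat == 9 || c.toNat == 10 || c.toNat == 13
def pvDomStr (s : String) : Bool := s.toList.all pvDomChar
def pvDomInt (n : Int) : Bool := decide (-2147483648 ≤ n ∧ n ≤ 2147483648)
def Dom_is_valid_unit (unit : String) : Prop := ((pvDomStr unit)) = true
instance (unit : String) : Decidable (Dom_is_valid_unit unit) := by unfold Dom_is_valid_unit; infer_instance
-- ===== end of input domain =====

-- B replaces A's three boolean scans with classify-then-set-logic: map each char to its category, collect the distinct categories as a set, decide by set comparison (alternative, same cost).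


-- ===== PORT A =====
def is_valid_unit (unit : String) : Bool :=
  if unit.toList = [] then false        -- if not unit: return False
  else if PySem.Str.strIsdigit unit then true
  else
    let has_letter := unit.toList.any PySem.Chars.isalpha
    let has_digit := unit.toList.any PySem.Chars.isdigit
    has_letter && has_digit

-- ===== PORT B =====
-- the conditional expression "digit" if c.isdigit() else "alpha" if c.isalpha() else "other"
def pvClassify (c : Char) : String :=
  if PySem.Chars.isdigit c then "digit"
  else if PySem.Chars.isalpha c then "alpha"
  else "other"

def is_valid_unit_alt (unit : String) : Bool :=
  let cats : PySem.Set String := PySem.Set.ofList (unit.toList.map pvClassify)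
  PySem.Set.equal cats (PySem.Set.ofList ["digit"])
    || PySem.Set.issubset (PySem.Set.ofList ["digit", "alpha"]) cats

-- ===== PRECONDITION & SPEC =====
def Spec_is_valid_unit (unit : String) (out : Bool) : Prop := out = is_valid_unit_alt unit
instance (unit : String) (out : Bool) : Decidable (Spec_is_valid_unit unit out) := by unfold Spec_is_valid_unit; infer_instance

-- ===== CLAIM (what is proved, stated in full; the proofs are below) =====
def Claim_equal_is_valid_unit : Prop := ∀ (unit : String), Dom_is_valid_unit unit → Spec_is_valid_unit unit (is_valid_unit unit)

-- ===== LEMMAS AND PROOFS =====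

theorem pvDigit_not_alpha (c : Char) (h : PySem.Chars.isdigit c = true) :
    PySem.Chars.isalpha c = false := by
  simp only [PySem.Chars.isdigit, PySem.Chars.isalpha, PySem.Chars.isupper, PySem.Chars.islower,
    Bool.and_eq_true, decide_eq_true_eq, Bool.or_eq_false_iff,
    Bool.and_eq_false_iff, decide_eq_false_iff_not] at *
  obtain ⟨h1, h2⟩ := h
  refine ⟨Or.inl fun h3 => ?_, Or.inl fun h3 => ?_⟩ <;> exact absurd (h3.trans h2) (by decide)

theorem pvClassify_eq_digit (c : Char) : pvClassify c = "digit" ↔ PySem.Chars.isdigit c = true := by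
  unfold pvClassify
  split_ifs with h1 h2 <;> simp_all

theorem pvClassify_eq_alpha (c : Char) : pvClassify c = "alpha" ↔ PySem.Chars.isalpha c = true := by
  unfold pvClassify
  split_ifs with h1 h2 <;> simp_all [pvDigit_not_alpha c]

theorem is_valid_unit_spec : Claim_equal_is_valid_unit := by
  intro unit _
  unfold Spec_is_valid_unit is_valid_unit is_valid_unit_alt
  simp only [PySem.Str.strIsdigit]
  generalize unit.toList = cs
  have hmem : ∀ x, x ∈ PySem.Set.ofList (cs.map pvClassify) ↔ x ∈ cs.map pvClassify :=
    fun x => PySem.Set.mem_ofList _ x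
  have hA : "alpha" ∈ PySem.Set.ofList (cs.map pvClassify) ↔ cs.any PySem.Chars.isalpha = true := by
    rw [hmem, List.mem_map, List.any_eq_true]
    exact ⟨fun ⟨c, hc, h⟩ => ⟨c, hc, (pvClassify_eq_alpha c).mp h⟩,
           fun ⟨c, hc, h⟩ => ⟨c, hc, (pvClassify_eq_alpha c).mpr h⟩⟩
  have hD : "digit" ∈ PySem.Set.ofList (cs.map pvClassify) ↔ cs.any PySem.Chars.isdigit = true := by
    rw [hmem, List.mem_map, List.any_eq_true]
    exact ⟨fun ⟨c, hc, h⟩ => ⟨c, hc, (pvClassify_eq_digit c).mp h⟩,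
           fun ⟨c, hc, h⟩ => ⟨c, hc, (pvClassify_eq_digit c).mpr h⟩⟩
  have hone : (PySem.Set.ofList ["digit"] : List String) = ["digit"] := by decide
  rcases hempty : cs with _ | ⟨a, as⟩
  · decide
  · simp only [reduceCtorEq, if_false]
    rw [← hempty]
    have hne : cs ≠ [] := by rw [hempty]; simp
    by_cases hd : cs.all PySem.Chars.isdigit = true
    · -- all digits: A = true; B's first disjunct holds (cats = {"digit"})
      rw [PySem.Chars.strIsdigit, if_pos (by rw [hempty] at hd ⊢; simp [hd])]
      symm
      rw [Bool.or_eq_true]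
      left
      rw [PySem.Set.equal, hone, Bool.and_eq_true]
      rw [List.all_eq_true] at hd
      constructor
      · rw [PySem.Set.issubset, List.all_eq_true]
        intro x hx
        rw [hmem, List.mem_map] at hx
        obtain ⟨c, hc, rfl⟩ := hx
        simp [PySem.Set.contains, (pvClassify_eq_digit c).mpr (hd c hc)]
      · rw [PySem.Set.issubset, List.all_eq_true]
        intro x hx
        rw [List.mem_singleton] at hx
        subst hx
        simp only [PySem.Set.contains, List.contains_eq_mem, decide_eq_true_eq, hD,
          List.any_eq_true]
        obtain ⟨c, hc⟩ := List.exists_mem_of_ne_nil cs hne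
        exact ⟨c, hc, hd c hc⟩
    · -- not all digits: A = any alpha && any digit; B's first disjunct is false
      rw [PySem.Chars.strIsdigit, if_neg (by simp [hd])]
      have hndig : ∃ c ∈ cs, PySem.Chars.isdigit c = false := by
        rw [List.all_eq_true] at hd
        push Not at hd
        obtain ⟨c, hc, h⟩ := hd
        exact ⟨c, hc, by simpa using h⟩
      have hneq : PySem.Set.equal (PySem.Set.ofList (cs.map pvClassify))
          (PySem.Set.ofList ["digit"]) = false := by
        obtain ⟨c, hc, hcd⟩ := hndig
        rw [PySem.Set.equal, hone, Bool.and_eq_false_iff]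
        left
        rw [PySem.Set.issubset]
        apply Bool.not_eq_true _ |>.mp
        rw [List.all_eq_true]
        push Not
        refine ⟨pvClassify c, ?_, ?_⟩
        · rw [hmem, List.mem_map]; exact ⟨c, hc, rfl⟩
        · have hnd : pvClassify c ≠ "digit" := by
            rw [Ne, pvClassify_eq_digit, hcd]; simp
          simp [PySem.Set.contains, hnd]
      rw [hneq, Bool.false_or]
      rw [PySem.Set.issubset]
      have hsub : (PySem.Set.ofList ["digit", "alpha"] : List String) = ["digit", "alpha"] := by
        decide
      rw [hsub]
      simp only [List.all_cons, List.all_nil, Bool.and_true, PySem.Set.contains,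
        List.contains_eq_mem]
      by_cases ha : cs.any PySem.Chars.isalpha = true <;>
        by_cases hdg : cs.any PySem.Chars.isdigit = true <;>
          simp [hA, hD, ha, hdg, Bool.and_comm]
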